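-- pv_equiv track=rewrite | github.com/ravikaravadara/PYTHON-ALL-CODE-SEM-2 | PYTHON lab 3/string problem   (7).py | generate_pythagorean_triplets
-- ===== SOURCE A (Python) =====
-- import math
--
-- def generate_pythagorean_triplets(limit):
--
--
--     triplets = []
--     for m in range(2, int(limit**0.5) + 1):
--         for n in range(1, m):
--             if (m + n) % 2 == 1 and math.gcd(m, n) == 1:
--                 a = m**2 - n**2
--                 b = 2 * m * n
--                 c = m**2 + n**2
--
--                 if a <= limit and b <= limit and c <= limit:
--                     triplets.append(tuple(sorted((a, b, c))))
--     return sorted(list(set(triplets)))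
-- ===== SOURCE B (Python) =====
-- def generate_pythagorean_triplets(limit):
--     # Berggren's ternary tree: every primitive Pythagorean triple is reached
--     # exactly once from (3, 4, 5) by the three linear maps below, so no
--     # gcd/parity bookkeeping on Euclid parameters is needed at all.
--     triplets = []
--     stack = [(3, 4, 5)]
--     while stack:
--         a, b, c = stack.pop()
--         if c <= limit:
--             triplets.append((min(a, b), max(a, b), c))
--             stack.append((a - 2 * b + 2 * c, 2 * a - b + 2 * c, 2 * a - 2 * b + 3 * c))
--             stack.append((a + 2 * b + 2 * c, 2 * a + b + 2 * c, 2 * a + 2 * b + 3 * c))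
--             stack.append((-a + 2 * b + 2 * c, -2 * a + b + 2 * c, -2 * a + 2 * b + 3 * c))
--     return sorted(set(triplets))
-- ===== Notes on version B (the rewrite author's own statement) =====
-- stated objective: alternative
-- what changed: B abandons Euclid's (m,n) parameter scan with its parity and gcd test on every candidate pair and instead walks Berggren's ternary tree of primitive triples from (3,4,5) with three linear maps, pruning at c > limit, so every node visited is a primitive triple and no gcd/parity/square bookkeeping exists at all.
import Mathlib
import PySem

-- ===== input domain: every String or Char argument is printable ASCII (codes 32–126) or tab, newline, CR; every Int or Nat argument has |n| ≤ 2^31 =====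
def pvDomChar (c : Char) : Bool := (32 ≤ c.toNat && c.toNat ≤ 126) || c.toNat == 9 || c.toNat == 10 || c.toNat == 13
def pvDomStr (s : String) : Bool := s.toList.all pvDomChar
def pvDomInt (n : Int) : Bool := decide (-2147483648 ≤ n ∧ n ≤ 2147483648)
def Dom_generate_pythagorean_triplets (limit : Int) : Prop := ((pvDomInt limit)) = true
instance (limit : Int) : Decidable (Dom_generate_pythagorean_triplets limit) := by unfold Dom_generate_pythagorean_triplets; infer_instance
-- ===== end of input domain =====

-- B replaces Euclid's (m,n) double loop (parity/gcd tests on every candidate pair) by a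
-- walk of Berggren's ternary tree of primitive triples rooted at (3,4,5); same output.


-- ===== PORT A =====
-- tuple(sorted((x, y, z))) on three ints: literal 3-element insertion sort (exact).
def sort3 (x y z : Int) : Int × Int × Int :=
  let p := if y < x then y else x
  let q := if y < x then x else y
  if z < p then (z, p, q) else if z < q then (p, z, q) else (p, q, z)

-- Python's sorted(...) on int triples compares tuples lexicographically; this key is
-- exact for it whenever all components lie in [0, 2^32) — which holds for every triple
-- either program ever stores under Pre_ and the input domain (components lie in [1, limit]).
def pvKey (t : Int × Int × Int) : Int := t.1 * 18446744073709551616 + t.2.1 * 4294967296 + t.2.2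

-- int(limit**0.5) ported as Int.sqrt limit: exact for 0 ≤ limit ≤ 2^31 (the float sqrt
-- of such an int floors to the integer square root); on a negative limit Python's limit**0.5
-- is a complex number and int(...) raises TypeError — those inputs are excluded by Pre_.
def generate_pythagorean_triplets (limit : Int) : List (Int × Int × Int) :=
  let triplets :=
    (PySem.List.pyRange 2 (Int.sqrt limit + 1)).foldl (fun acc m =>
      (PySem.List.pyRange 1 m).foldl (fun acc n =>
        if PySem.Int.mod (m + n) 2 = 1 ∧ Int.gcd m n = 1 then
          let a := m ^ 2 - n ^ 2
          let b := 2 * m * n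
          let c := m ^ 2 + n ^ 2
          if a ≤ limit ∧ b ≤ limit ∧ c ≤ limit then acc ++ [sort3 a b c] else acc
        else acc) acc) []
  PySem.List.sorted (PySem.Set.ofList triplets) pvKey

-- ===== PORT B =====
-- the root (3,4,5) satisfies the legs-below-hypotenuse invariant pvDfs carries
lemma pvRoot_inv : (1:Int) ≤ 3 ∧ (1:Int) ≤ 4 ∧ (3:Int) < 5 ∧ (4:Int) < 5 := by omega

-- Source B's 'while stack: a,b,c = stack.pop(); …' ported as this structural recursion: the
-- Python stack is the call stack, popping a node visits it and then the three pushed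
-- subtrees last-pushed-first (exactly the list below); the hypothesis argument h only
-- records the invariant of every reachable state and justifies termination.
def pvDfs (limit a b c : Int) (h : 1 ≤ a ∧ 1 ≤ b ∧ a < c ∧ b < c) : List (Int × Int × Int) :=
  if hc : c ≤ limit then
    (min a b, max a b, c) ::
      (pvDfs limit (-a + 2*b + 2*c) (-2*a + b + 2*c) (-2*a + 2*b + 3*c) (by omega) ++
       (pvDfs limit (a + 2*b + 2*c) (2*a + b + 2*c) (2*a + 2*b + 3*c) (by omega) ++
        pvDfs limit (a - 2*b + 2*c) (2*a - b + 2*c) (2*a - 2*b + 3*c) (by omega)))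
  else []
termination_by (limit + 1 - c).toNat
decreasing_by all_goals omega

def generate_pythagorean_triplets_alt (limit : Int) : List (Int × Int × Int) :=
  PySem.List.sorted (PySem.Set.ofList (pvDfs limit 3 4 5 pvRoot_inv)) pvKey

-- ===== PRECONDITION & SPEC =====
-- A raises TypeError on a negative limit (limit**0.5 is a complex number there); it returns on every nonnegative limit.
def Pre_generate_pythagorean_triplets (limit : Int) : Prop := 0 ≤ limit
instance (limit : Int) : Decidable (Pre_generate_pythagorean_triplets limit) := by unfold Pre_generate_pythagorean_triplets; infer_instance
def pvWitness_generate_pythagorean_triplets : Int := 50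

def Spec_generate_pythagorean_triplets (limit : Int) (out : List (Int × Int × Int)) : Prop := out = generate_pythagorean_triplets_alt limit
instance (limit : Int) (out : List (Int × Int × Int)) : Decidable (Spec_generate_pythagorean_triplets limit out) := by unfold Spec_generate_pythagorean_triplets; infer_instance

-- ===== CLAIM (what is proved, stated in full; the proofs are below) =====
def Claim_equal_generate_pythagorean_triplets : Prop := ∀ (limit : Int), Dom_generate_pythagorean_triplets limit → Pre_generate_pythagorean_triplets limit → Spec_generate_pythagorean_triplets limit (generate_pythagorean_triplets limit)

-- ===== LEMMAS AND PROOFS =====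

-- A's loop condition and raw candidate list (before set() and sorted())
def condA (limit m n : Int) : Bool :=
  decide (PySem.Int.mod (m + n) 2 = 1 ∧ Int.gcd m n = 1 ∧
    (m ^ 2 - n ^ 2 ≤ limit ∧ 2 * m * n ≤ limit ∧ m ^ 2 + n ^ 2 ≤ limit))

def listA (limit : Int) : List (Int × Int × Int) :=
  (PySem.List.pyRange 2 (Int.sqrt limit + 1)).flatMap (fun m =>
    ((PySem.List.pyRange 1 m).filter (fun n => condA limit m n)).map
      (fun n => sort3 (m ^ 2 - n ^ 2) (2 * m * n) (m ^ 2 + n ^ 2)))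

-- a valid Euclid parameter pair, and the triple it generates (smaller leg first)
def pvValid (m n : Int) : Prop := 1 ≤ n ∧ n < m ∧ Int.gcd m n = 1 ∧ (m + n) % 2 = 1

def pvTup (m n : Int) : Int × Int × Int :=
  (min (m^2 - n^2) (2*m*n), max (m^2 - n^2) (2*m*n), m^2 + n^2)

lemma portA_eq_listA (limit : Int) :
    generate_pythagorean_triplets limit = PySem.List.sorted (PySem.Set.ofList (listA limit)) pvKey := by
  have inner : ∀ (m : Int) (acc : List (Int × Int × Int)),
      (PySem.List.pyRange 1 m).foldl (fun acc n =>
        if PySem.Int.mod (m + n) 2 = 1 ∧ Int.gcd m n = 1 then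
          let a := m ^ 2 - n ^ 2
          let b := 2 * m * n
          let c := m ^ 2 + n ^ 2
          if a ≤ limit ∧ b ≤ limit ∧ c ≤ limit then acc ++ [sort3 a b c] else acc
        else acc) acc
      = acc ++ ((PySem.List.pyRange 1 m).filter (fun n => condA limit m n)).map
          (fun n => sort3 (m ^ 2 - n ^ 2) (2 * m * n) (m ^ 2 + n ^ 2)) := by
    intro m acc
    rw [← PySem.List.foldl_append_if]
    refine PySem.List.foldl_congr_mem _ _ _ _ ?_
    intro acc n _
    dsimp only
    simp only [condA, decide_eq_true_eq]
    all_goals split_ifs <;> first | rfl | (exfalso; tauto)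
  unfold generate_pythagorean_triplets listA
  rw [PySem.List.foldl_congr_mem _ _ (fun acc m => acc ++
        ((PySem.List.pyRange 1 m).filter (fun n => condA limit m n)).map
          (fun n => sort3 (m ^ 2 - n ^ 2) (2 * m * n) (m ^ 2 + n ^ 2))) _
        (fun acc m _ => inner m acc),
      PySem.List.foldl_append_eq_flatMap, List.nil_append]

lemma mem_listA (limit : Int) (t : Int × Int × Int) :
    t ∈ listA limit ↔ ∃ m n : Int, 2 ≤ m ∧ m ≤ Int.sqrt limit ∧ 1 ≤ n ∧ n < m ∧
      condA limit m n = true ∧ t = sort3 (m ^ 2 - n ^ 2) (2 * m * n) (m ^ 2 + n ^ 2) := by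
  simp [listA, List.mem_flatMap, List.mem_map, List.mem_filter, PySem.List.mem_pyRange_one]
  constructor
  · rintro ⟨m, ⟨h1, h2⟩, n, ⟨⟨h3, h4⟩, h5⟩, h6⟩; exact ⟨m, h1, h2, n, h3, h4, h5, h6.symm⟩
  · rintro ⟨m, h1, h2, n, h3, h4, h5, h6⟩; exact ⟨m, ⟨h1, h2⟩, n, ⟨⟨h3, h4⟩, h5⟩, h6.symm⟩

lemma le_sqrt_of_sq_le (m L : Int) (hm : 0 ≤ m) (hL : 0 ≤ L) (h : m * m ≤ L) : m ≤ Int.sqrt L := by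
  have e : (m.toNat : Int) = m := Int.toNat_of_nonneg hm
  have h1 : m.toNat * m.toNat ≤ L.toNat := by
    have : ((m.toNat * m.toNat : Nat) : Int) ≤ (L.toNat : Int) := by
      push_cast [e]; rw [Int.toNat_of_nonneg hL]; exact h
    exact_mod_cast this
  have h2 : m.toNat ≤ Nat.sqrt L.toNat := Nat.le_sqrt.mpr h1
  unfold Int.sqrt
  omega

lemma sort3_eq (x y z : Int) (hxz : x ≤ z) (hyz : y ≤ z) :
    sort3 x y z = (min x y, max x y, z) := by
  unfold sort3
  simp only [min_def, max_def]
  split_ifs <;> simp_all [Prod.mk.injEq] <;> omega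

-- A's list holds exactly the triples of the valid pairs with hypotenuse ≤ limit
lemma listA_char (limit : Int) (h0 : 0 ≤ limit) (t : Int × Int × Int) :
    t ∈ listA limit ↔ ∃ m n : Int, pvValid m n ∧ m^2 + n^2 ≤ limit ∧ t = pvTup m n := by
  rw [mem_listA]
  constructor
  · rintro ⟨m, n, h2m, hmsq, h1n, hnm, hcA, ht⟩
    simp only [condA, decide_eq_true_eq] at hcA
    obtain ⟨hmod, hgcd, hxl, hyl, hcl⟩ := hcA
    have hmod' : (m + n) % 2 = 1 := by
      rwa [PySem.Int.mod_eq_emod_of_pos (by norm_num)] at hmod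
    refine ⟨m, n, ⟨h1n, hnm, hgcd, hmod'⟩, hcl, ?_⟩
    rw [ht, sort3_eq _ _ _ (by nlinarith [sq_nonneg n]) (by nlinarith [sq_nonneg (m - n)])]
    rfl
  · rintro ⟨m, n, ⟨h1n, hnm, hg, hp⟩, hcl, rfl⟩
    have hx : m^2 - n^2 ≤ m^2 + n^2 := by nlinarith [sq_nonneg n]
    have hy : 2*m*n ≤ m^2 + n^2 := by nlinarith [sq_nonneg (m - n)]
    refine ⟨m, n, by omega, le_sqrt_of_sq_le m limit (by omega) h0 (by nlinarith [sq_nonneg n]),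
      h1n, hnm, ?_, ?_⟩
    · simp only [condA, decide_eq_true_eq]
      refine ⟨?_, hg, by omega, by omega, hcl⟩
      rw [PySem.Int.mod_eq_emod_of_pos (by norm_num)]; exact hp
    · rw [sort3_eq _ _ _ hx hy]; rfl

-- every valid pair generates a tree node satisfying pvDfs's invariant
lemma pvNode_inv (m n : Int) (hv : pvValid m n) :
    1 ≤ m^2 - n^2 ∧ 1 ≤ 2*m*n ∧ m^2 - n^2 < m^2 + n^2 ∧ 2*m*n < m^2 + n^2 := by
  obtain ⟨h1, h2, _, _⟩ := hv
  refine ⟨by nlinarith, by nlinarith, by nlinarith, by nlinarith [sq_nonneg (m - n)]⟩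

lemma pvDfs_congr (limit a b c a' b' c' : Int) (ha : a = a') (hb : b = b') (hc : c = c')
    (h : 1 ≤ a ∧ 1 ≤ b ∧ a < c ∧ b < c) (h' : 1 ≤ a' ∧ 1 ≤ b' ∧ a' < c' ∧ b' < c') :
    pvDfs limit a b c h = pvDfs limit a' b' c' h' := by
  subst ha hb hc; rfl

-- the three child maps and the three parent maps preserve coprimality
lemma pvGcd_c1 (m n : Int) (h : Int.gcd m n = 1) : Int.gcd (2*m - n) m = 1 := by
  rw [Int.gcd_comm, show 2*m - n = -n + m * 2 by ring, Int.gcd_add_mul_left_right,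
      Int.gcd_neg, h]
lemma pvGcd_c2 (m n : Int) (h : Int.gcd m n = 1) : Int.gcd (2*m + n) m = 1 := by
  rw [Int.gcd_comm, show 2*m + n = n + m * 2 by ring, Int.gcd_add_mul_left_right, h]
lemma pvGcd_c3 (m n : Int) (h : Int.gcd m n = 1) : Int.gcd (m + 2*n) n = 1 := by
  rw [Int.gcd_comm, show m + 2*n = m + n * 2 by ring, Int.gcd_add_mul_left_right,
      Int.gcd_comm, h]
lemma pvGcd_p1 (m n : Int) (h : Int.gcd m n = 1) : Int.gcd n (2*n - m) = 1 := by
  rw [show 2*n - m = -m + n * 2 by ring, Int.gcd_add_mul_left_right, Int.gcd_neg,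
      Int.gcd_comm, h]
lemma pvGcd_p2 (m n : Int) (h : Int.gcd m n = 1) : Int.gcd n (m - 2*n) = 1 := by
  rw [show m - 2*n = m + n * (-2) by ring, Int.gcd_add_mul_left_right, Int.gcd_comm, h]
lemma pvGcd_p3 (m n : Int) (h : Int.gcd m n = 1) : Int.gcd (m - 2*n) n = 1 := by
  rw [Int.gcd_comm]; exact pvGcd_p2 m n h

-- soundness: everything in the subtree of a valid pair's node is a valid pair's triple ≤ limit
lemma pvDfs_sound (limit : Int) : ∀ (a b c : Int) (h : 1 ≤ a ∧ 1 ≤ b ∧ a < c ∧ b < c),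
    (∃ m n, pvValid m n ∧ a = m^2 - n^2 ∧ b = 2*m*n ∧ c = m^2 + n^2) →
    ∀ t ∈ pvDfs limit a b c h,
      ∃ m n, pvValid m n ∧ m^2 + n^2 ≤ limit ∧ t = pvTup m n := by
  intro a b c h
  induction a, b, c, h using pvDfs.induct limit with
  | case1 a b c h hc ih3 ih2 ih1 =>
    rintro ⟨m, n, hv, rfl, rfl, rfl⟩ t ht
    rw [pvDfs, dif_pos hc] at ht
    obtain ⟨h1n, hnm, hg, hp⟩ := hv
    rcases List.mem_cons.mp ht with rfl | ht
    · exact ⟨m, n, ⟨h1n, hnm, hg, hp⟩, hc, rfl⟩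
    rcases List.mem_append.mp ht with ht | ht
    · -- last-pushed child, visited first: pair (m + 2n, n)
      exact ih3 ⟨m + 2*n, n, ⟨h1n, by omega, pvGcd_c3 m n hg, by omega⟩,
        by ring, by ring, by ring⟩ t ht
    rcases List.mem_append.mp ht with ht | ht
    · -- pair (2m + n, m)
      exact ih2 ⟨2*m + n, m, ⟨by omega, by omega, pvGcd_c2 m n hg, by omega⟩,
        by ring, by ring, by ring⟩ t ht
    · -- pair (2m - n, m)
      exact ih1 ⟨2*m - n, m, ⟨by omega, by omega, pvGcd_c1 m n hg, by omega⟩,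
        by ring, by ring, by ring⟩ t ht
  | case2 a b c h hc =>
    rintro ⟨m, n, hv, rfl, rfl, rfl⟩ t ht
    rw [pvDfs, dif_neg hc] at ht
    exact absurd ht List.not_mem_nil

-- completeness: the subtree of any valid pair's node is inside the tree rooted at (3,4,5);
-- descent on m + n through the unique valid parent pair
lemma pvDfs_sub (limit : Int) : ∀ (K : Nat) (m n : Int) (hv : pvValid m n),
    (m + n).toNat ≤ K → ∀ (t : Int × Int × Int),
    t ∈ pvDfs limit (m^2 - n^2) (2*m*n) (m^2 + n^2) (pvNode_inv m n hv) →
    t ∈ pvDfs limit 3 4 5 pvRoot_inv := by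
  intro K
  induction K with
  | zero => intro m n hv hK t _; exact absurd hK (by obtain ⟨h1, h2, _, _⟩ := hv; omega)
  | succ K ih =>
    intro m n hv hK t ht
    obtain ⟨h1n, hnm, hg, hp⟩ := hv
    by_cases hbase : m = 2 ∧ n = 1
    · obtain ⟨rfl, rfl⟩ := hbase
      rwa [pvDfs_congr limit _ _ _ 3 4 5 (by norm_num) (by norm_num) (by norm_num)
        _ pvRoot_inv] at ht
    by_cases hcl : m^2 + n^2 ≤ limit
    swap
    · rw [pvDfs, dif_neg hcl] at ht
      exact absurd ht List.not_mem_nil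
    have hne2n : m ≠ 2*n := by
      intro he
      have hd : n.toNat ∣ Int.gcd m n := by
        refine Int.dvd_gcd ?_ ?_
        · rw [Int.toNat_of_nonneg (by omega : (0:Int) ≤ n)]; exact ⟨2, by omega⟩
        · rw [Int.toNat_of_nonneg (by omega : (0:Int) ≤ n)]
      rw [hg] at hd
      have : n = 1 := by have := Nat.le_of_dvd one_pos hd; omega
      omega
    have hne3n : m ≠ 3*n := by intro he; omega
    rcases lt_trichotomy m (2*n) with hcase | hcase | hcase
    · -- parent (n, 2n - m); (m, n) is its first-pushed child (2p - q, p)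
      have hv' : pvValid n (2*n - m) := ⟨by omega, by omega, pvGcd_p1 m n hg, by omega⟩
      have hcl' : n^2 + (2*n - m)^2 ≤ limit := by nlinarith
      have hstep : t ∈ pvDfs limit (n^2 - (2*n - m)^2) (2*n*(2*n - m)) (n^2 + (2*n - m)^2)
          (pvNode_inv _ _ hv') := by
        rw [pvDfs, dif_pos hcl']
        refine List.mem_cons_of_mem _ (List.mem_append_right _ (List.mem_append_right _ ?_))
        rwa [pvDfs_congr limit _ _ _ (m^2 - n^2) (2*m*n) (m^2 + n^2)
          (by ring) (by ring) (by ring) _ (pvNode_inv m n ⟨h1n, hnm, hg, hp⟩)]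
      exact ih n (2*n - m) hv' (by omega) t hstep
    · exact absurd hcase hne2n
    rcases lt_trichotomy m (3*n) with hcase2 | hcase2 | hcase2
    · -- parent (n, m - 2n); (m, n) is its second-pushed child (2p + q, p)
      have hv' : pvValid n (m - 2*n) := ⟨by omega, by omega, pvGcd_p2 m n hg, by omega⟩
      have hcl' : n^2 + (m - 2*n)^2 ≤ limit := by nlinarith
      have hstep : t ∈ pvDfs limit (n^2 - (m - 2*n)^2) (2*n*(m - 2*n)) (n^2 + (m - 2*n)^2)
          (pvNode_inv _ _ hv') := by
        rw [pvDfs, dif_pos hcl']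
        refine List.mem_cons_of_mem _ (List.mem_append_right _ (List.mem_append_left _ ?_))
        rwa [pvDfs_congr limit _ _ _ (m^2 - n^2) (2*m*n) (m^2 + n^2)
          (by ring) (by ring) (by ring) _ (pvNode_inv m n ⟨h1n, hnm, hg, hp⟩)]
      exact ih n (m - 2*n) hv' (by omega) t hstep
    · exact absurd hcase2 hne3n
    · -- parent (m - 2n, n); (m, n) is its third-pushed child (p + 2q, q)
      have hv' : pvValid (m - 2*n) n := ⟨by omega, by omega, pvGcd_p3 m n hg, by omega⟩
      have hcl' : (m - 2*n)^2 + n^2 ≤ limit := by nlinarith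
      have hstep : t ∈ pvDfs limit ((m - 2*n)^2 - n^2) (2*(m - 2*n)*n) ((m - 2*n)^2 + n^2)
          (pvNode_inv _ _ hv') := by
        rw [pvDfs, dif_pos hcl']
        refine List.mem_cons_of_mem _ (List.mem_append_left _ ?_)
        rwa [pvDfs_congr limit _ _ _ (m^2 - n^2) (2*m*n) (m^2 + n^2)
          (by ring) (by ring) (by ring) _ (pvNode_inv m n ⟨h1n, hnm, hg, hp⟩)]
      exact ih (m - 2*n) n hv' (by omega) t hstep

lemma mem_pvDfs_iff (limit : Int) (t : Int × Int × Int) :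
    t ∈ pvDfs limit 3 4 5 pvRoot_inv ↔
      ∃ m n, pvValid m n ∧ m^2 + n^2 ≤ limit ∧ t = pvTup m n := by
  constructor
  · intro ht
    refine pvDfs_sound limit 3 4 5 pvRoot_inv
      ⟨2, 1, ⟨by omega, by omega, by decide, by decide⟩, by norm_num, by norm_num, by norm_num⟩ t ht
  · rintro ⟨m, n, hv, hcl, rfl⟩
    have hhead : pvTup m n ∈ pvDfs limit (m^2 - n^2) (2*m*n) (m^2 + n^2) (pvNode_inv m n hv) := by
      rw [pvDfs, dif_pos hcl]
      exact List.mem_cons_self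
    exact pvDfs_sub limit (m + n).toNat m n hv le_rfl _ hhead

-- the central set equivalence: both raw lists hold exactly the primitive triples ≤ limit
lemma mem_equiv (limit : Int) (h0 : 0 ≤ limit) (t : Int × Int × Int) :
    t ∈ listA limit ↔ t ∈ pvDfs limit 3 4 5 pvRoot_inv := by
  rw [listA_char limit h0, mem_pvDfs_iff]

lemma pvDfs_bounds (limit : Int) (t : Int × Int × Int) (ht : t ∈ pvDfs limit 3 4 5 pvRoot_inv) :
    0 ≤ t.1 ∧ t.1 ≤ limit ∧ 0 ≤ t.2.1 ∧ t.2.1 ≤ limit ∧ 0 ≤ t.2.2 ∧ t.2.2 ≤ limit := by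
  rw [mem_pvDfs_iff] at ht
  obtain ⟨m, n, hv, hcl, rfl⟩ := ht
  obtain ⟨i1, i2, i3, i4⟩ := pvNode_inv m n hv
  unfold pvTup
  dsimp only
  refine ⟨le_min (by omega) (by omega), le_trans (min_le_left _ _) (by omega),
    le_trans (by omega) (le_max_left _ _), max_le (by omega) (by omega), by omega, hcl⟩

lemma pvKey_inj (t u : Int × Int × Int)
    (ht : 0 ≤ t.1 ∧ t.1 < 4294967296 ∧ 0 ≤ t.2.1 ∧ t.2.1 < 4294967296 ∧ 0 ≤ t.2.2 ∧ t.2.2 < 4294967296)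
    (hu : 0 ≤ u.1 ∧ u.1 < 4294967296 ∧ 0 ≤ u.2.1 ∧ u.2.1 < 4294967296 ∧ 0 ≤ u.2.2 ∧ u.2.2 < 4294967296)
    (h : pvKey t = pvKey u) : t = u := by
  obtain ⟨x1, x2, x3⟩ := t; obtain ⟨y1, y2, y3⟩ := u
  simp only [pvKey] at h ht hu
  simp only [Prod.mk.injEq]
  omega

-- ===== VERDICT (by name: the statement is the Claim_ definition above) =====
theorem generate_pythagorean_triplets_spec : Claim_equal_generate_pythagorean_triplets := by
  intro limit hdom hpre
  unfold Spec_generate_pythagorean_triplets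
  have h0 : 0 ≤ limit := hpre
  have hlim : limit ≤ 2147483648 := by
    unfold Dom_generate_pythagorean_triplets pvDomInt at hdom
    simpa using (of_decide_eq_true hdom).2
  rw [portA_eq_listA]
  unfold generate_pythagorean_triplets_alt
  have hndB : (PySem.Set.ofList (pvDfs limit 3 4 5 pvRoot_inv)).Nodup := PySem.Set.nodup_ofList _
  have hperm := PySem.List.sorted_perm (PySem.Set.ofList (pvDfs limit 3 4 5 pvRoot_inv)) pvKey false
  have hndys : (PySem.List.sorted (PySem.Set.ofList (pvDfs limit 3 4 5 pvRoot_inv)) pvKey).Nodup :=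
    (hperm.nodup_iff).mpr hndB
  have hboundsys : ∀ t ∈ PySem.List.sorted (PySem.Set.ofList (pvDfs limit 3 4 5 pvRoot_inv)) pvKey,
      0 ≤ t.1 ∧ t.1 < 4294967296 ∧ 0 ≤ t.2.1 ∧ t.2.1 < 4294967296 ∧ 0 ≤ t.2.2 ∧ t.2.2 < 4294967296 := by
    intro t htmem
    have : t ∈ pvDfs limit 3 4 5 pvRoot_inv := by
      have := hperm.mem_iff.mp htmem
      rwa [PySem.Set.mem_ofList] at this
    have hb := pvDfs_bounds limit t this
    exact ⟨hb.1, by omega, hb.2.2.1, by omega, hb.2.2.2.2.1, by omega⟩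
  apply PySem.List.sorted_eq_of_perm_of_pairwise_lt
  · -- the sorted tree list is a permutation of set(listA)
    refine (List.perm_ext_iff_of_nodup hndys (PySem.Set.nodup_ofList _)).mpr ?_
    intro t
    rw [hperm.mem_iff, PySem.Set.mem_ofList, PySem.Set.mem_ofList]
    exact (mem_equiv limit h0 t).symm
  · -- and strictly increasing under pvKey
    have hle := PySem.List.sorted_pairwise (PySem.Set.ofList (pvDfs limit 3 4 5 pvRoot_inv)) pvKey
    have hcomb := hle.and hndys
    refine hcomb.imp_of_mem ?_
    intro t u htm hum ⟨hlekey, hne⟩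
    rcases lt_or_eq_of_le hlekey with h | h
    · exact h
    · exact absurd (pvKey_inj t u (hboundsys t htm) (hboundsys u hum) h) hne
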